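-- pv_equiv track=rewrite | github.com/BB31420/char_freq_anal | intersection.py | generate_combined_pattern
-- ===== SOURCE A (Python) =====
-- def generate_combined_pattern(word1, word2, word3):
--     pattern1, pattern2, pattern3 = [], [], []
--     letter_map = {}
--     current_index = 0
--     for letter in word1 + word2 + word3:
--         if letter not in letter_map:
--             letter_map[letter] = current_index
--             current_index += 1
--     for letter in word1:
--         pattern1.append(letter_map[letter])
--     for letter in word2:
--         pattern2.append(letter_map[letter])
--     for letter in word3:
--         pattern3.append(letter_map[letter])
--     return pattern1, pattern2, pattern3
-- ===== SOURCE B (Python) =====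
-- def generate_combined_pattern(word1, word2, word3):
--     combined = word1 + word2 + word3
--
--     def index_of(c):
--         # first-seen index of c = number of distinct letters strictly before
--         # c's first occurrence in combined; c always occurs in combined here
--         return len(set(combined[:combined.index(c)]))
--
--     return ([index_of(c) for c in word1],
--             [index_of(c) for c in word2],
--             [index_of(c) for c in word3])
-- ===== Notes on version B (the rewrite author's own statement) =====
-- stated objective: alternative
-- what changed: Removes the shared first-seen dictionary entirely: each letter's index is recomputed on demand as the number of distinct characters in the combined string before that letter's first occurrence (index + set of the prefix), trading A's build-then-read table for stateless per-letter computations.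
import Mathlib
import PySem

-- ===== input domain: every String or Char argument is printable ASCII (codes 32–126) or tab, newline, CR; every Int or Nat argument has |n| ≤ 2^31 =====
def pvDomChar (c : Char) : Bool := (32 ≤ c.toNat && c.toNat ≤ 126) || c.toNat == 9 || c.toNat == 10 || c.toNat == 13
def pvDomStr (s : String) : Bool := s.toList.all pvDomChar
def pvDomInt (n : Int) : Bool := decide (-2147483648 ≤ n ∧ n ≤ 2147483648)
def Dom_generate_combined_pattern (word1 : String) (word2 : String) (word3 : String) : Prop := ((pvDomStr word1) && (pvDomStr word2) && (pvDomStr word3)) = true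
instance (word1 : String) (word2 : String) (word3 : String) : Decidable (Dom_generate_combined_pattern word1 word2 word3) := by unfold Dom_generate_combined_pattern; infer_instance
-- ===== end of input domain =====

-- B replaces A's shared first-seen dictionary by stateless per-letter scans of the
-- combined string (an alternative decomposition, not faster); return values proved equal.

-- ===== PORT A =====
-- first loop: build letter_map over word1+word2+word3 with an explicit counter
def pvBuildA (cs : List Char) : PySem.Dict Char Int × Int :=
  cs.foldl (fun s c => if s.1.contains c then s else (s.1.insert c s.2, s.2 + 1))
    ((PySem.Dict.empty : PySem.Dict Char Int), (0 : Int))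

-- letter_map[letter] cannot raise (every letter of the words was inserted by the
-- first loop), so getD _ 0 is exact for the subscript.
def generate_combined_pattern (word1 : String) (word2 : String) (word3 : String) : List Int × List Int × List Int :=
  let m := (pvBuildA (word1.toList ++ word2.toList ++ word3.toList)).1
  let pattern1 := word1.toList.foldl (fun acc c => acc ++ [m.getD c 0]) []
  let pattern2 := word2.toList.foldl (fun acc c => acc ++ [m.getD c 0]) []
  let pattern3 := word3.toList.foldl (fun acc c => acc ++ [m.getD c 0]) []
  (pattern1, pattern2, pattern3)

-- ===== PORT B =====
-- index_of(c) = len(set(combined[:combined.index(c)])); str.index raises ValueError when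
-- absent — unreachable in B's calls (c always occurs in combined), the none arm mirrors it.
def pvIndexOfB (cs : List Char) (c : Char) : Int :=
  match PySem.List.index? cs c with
  | some i => ((PySem.Set.ofList (PySem.List.slice cs none (some (i : Int)))).length : Int)
  | none => 0

def generate_combined_pattern_alt (word1 : String) (word2 : String) (word3 : String) : List Int × List Int × List Int :=
  let combined := word1.toList ++ word2.toList ++ word3.toList
  (word1.toList.map (fun c => pvIndexOfB combined c),
   word2.toList.map (fun c => pvIndexOfB combined c),
   word3.toList.map (fun c => pvIndexOfB combined c))

-- ===== PRECONDITION & SPEC =====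
def Spec_generate_combined_pattern (word1 : String) (word2 : String) (word3 : String) (out : List Int × List Int × List Int) : Prop := out = generate_combined_pattern_alt word1 word2 word3
instance (word1 : String) (word2 : String) (word3 : String) (out : List Int × List Int × List Int) : Decidable (Spec_generate_combined_pattern word1 word2 word3 out) := by unfold Spec_generate_combined_pattern; infer_instance

-- ===== CLAIM (what is proved, stated in full; the proofs are below) =====
def Claim_equal_generate_combined_pattern : Prop := ∀ (word1 : String) (word2 : String) (word3 : String), Dom_generate_combined_pattern word1 word2 word3 → Spec_generate_combined_pattern word1 word2 word3 (generate_combined_pattern word1 word2 word3)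

-- ===== LEMMAS AND PROOFS =====

-- canonical first-seen-index map
def pvBuild (d : PySem.Dict Char Int) (cs : List Char) : PySem.Dict Char Int :=
  cs.foldl (fun d c => if d.contains c then d else d.insert c (d.size : Int)) d

theorem pvBuild_cons (d : PySem.Dict Char Int) (c : Char) (cs : List Char) :
    pvBuild d (c :: cs) = pvBuild (if d.contains c then d else d.insert c (d.size : Int)) cs := rfl

-- once a key is bound it stays bound to the same value
theorem pvBuild_preserve (cs : List Char) (d : PySem.Dict Char Int) (c : Char) (v : Int)
    (h : d.get? c = some v) : (pvBuild d cs).get? c = some v := by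
  induction cs generalizing d with
  | nil => exact h
  | cons x xs ih =>
    rw [pvBuild_cons]
    split
    · exact ih _ h
    · apply ih
      by_cases hxc : c = x
      · subst hxc
        have : d.contains c = true := by
          rw [PySem.Dict.contains_eq_isSome_get?, h]; rfl
        simp_all
      · rw [PySem.Dict.get?_insert_of_ne _ _ hxc, h]

-- A's first loop computes pvBuild, with counter = size
theorem pvBuildA_eq (cs : List Char) (d : PySem.Dict Char Int) (i : Int) (hi : i = (d.size : Int)) :
    cs.foldl (fun s c => if s.1.contains c then s else (s.1.insert c s.2, s.2 + 1)) (d, i)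
      = (pvBuild d cs, ((pvBuild d cs).size : Int)) := by
  induction cs generalizing d i with
  | nil => simp [pvBuild, hi]
  | cons x xs ih =>
    rw [List.foldl_cons, pvBuild_cons]
    by_cases hc : d.contains x
    · simp only [hc, if_true]
      exact ih d i hi
    · simp only [hc, if_false, Bool.false_eq_true]
      subst hi
      apply ih
      rw [PySem.Dict.size_insert]
      simp [hc]

-- MAIN INVARIANT: if the dict d mirrors the set s (same key set, size = card), then for
-- a fresh key c, A's table lookup equals the number of distinct chars before c.
theorem pvBuild_getD_eq (pre : List Char) (suf : List Char) (c : Char) (hpre : c ∉ pre)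
    (d : PySem.Dict Char Int) (s : PySem.Set Char)
    (hsize : (d.size : Int) = (s.length : Int))
    (hmem : ∀ x, d.contains x = true ↔ x ∈ s)
    (hcs : c ∉ s) :
    (pvBuild d (pre ++ c :: suf)).getD c 0 = ((PySem.Set.update s pre).length : Int) := by
  induction pre generalizing d s with
  | nil =>
    have hc : d.contains c = false := by
      rcases h : d.contains c with _ | _
      · rfl
      · exact absurd ((hmem c).mp h) hcs
    rw [List.nil_append, pvBuild_cons]
    simp only [hc, Bool.false_eq_true, if_false]
    rw [PySem.Dict.getD_of_get?_eq_some _ _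
      (pvBuild_preserve _ _ _ _ (PySem.Dict.get?_insert_self _ _ _))]
    simpa [PySem.Set.update] using hsize
  | cons x pre' ih =>
    have hxc : c ≠ x := fun h => hpre (h ▸ List.mem_cons_self)
    have hpre' : c ∉ pre' := fun h => hpre (List.mem_cons_of_mem _ h)
    rw [List.cons_append, pvBuild_cons]
    have hupd : PySem.Set.update s (x :: pre') = PySem.Set.update (PySem.Set.add s x) pre' := rfl
    rw [hupd]
    by_cases hx : x ∈ s
    · have hcx : d.contains x = true := (hmem x).mpr hx
      have hadd : PySem.Set.add s x = s := by simp [PySem.Set.add, PySem.Set.contains, hx]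
      simp only [hcx, if_true, hadd]
      exact ih hpre' _ _ hsize hmem hcs
    · have hcx : d.contains x = false := by
        rcases h : d.contains x with _ | _
        · rfl
        · exact absurd ((hmem x).mp h) hx
      have hadd : PySem.Set.add s x = s ++ [x] := by simp [PySem.Set.add, PySem.Set.contains, hx]
      simp only [hcx, Bool.false_eq_true, if_false]
      apply ih hpre'
      · rw [PySem.Dict.size_insert]
        simp only [hcx, Bool.false_eq_true, if_false]
        simp [hadd, hsize]
      · intro y
        rw [PySem.Dict.contains_eq_isSome_get?]
        by_cases hyx : y = x
        · subst hyx
          simp [PySem.Dict.get?_insert_self, hadd]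
        · rw [PySem.Dict.get?_insert_of_ne _ _ hyx, ← PySem.Dict.contains_eq_isSome_get?]
          simp [hmem y, hadd, hyx]
      · simp only [hadd, List.mem_append, List.mem_singleton]
        rintro (h | rfl)
        · exact hcs h
        · exact hxc rfl

-- A's pattern loops are maps
theorem pvFoldAppend_eq_map (m : PySem.Dict Char Int) (cs : List Char) (acc : List Int) :
    cs.foldl (fun acc c => acc ++ [m.getD c 0]) acc = acc ++ cs.map (fun c => m.getD c 0) := by
  induction cs generalizing acc with
  | nil => simp
  | cons x xs ih => simp [ih, List.append_assoc]

-- specialization to the top-level call (empty dict, empty set)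
theorem pvLookup_eq (cs : List Char) (c : Char) (hin : c ∈ cs) :
    (pvBuild PySem.Dict.empty cs).getD c 0 = pvIndexOfB cs c := by
  have hsome : (PySem.List.index? cs c).isSome := (PySem.List.index?_isSome_iff cs c).mpr hin
  obtain ⟨i, hi⟩ := Option.isSome_iff_exists.mp hsome
  obtain ⟨pre, suf, hcs, hlen, hnp⟩ := (PySem.List.index?_eq_some_iff cs c i).mp hi
  unfold pvIndexOfB
  rw [hi]
  subst hcs
  subst hlen
  simp only [PySem.List.slice_to_natCast, List.take_left]
  have hofl : PySem.Set.ofList pre = PySem.Set.update (PySem.Set.empty) pre := rfl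
  rw [hofl]
  apply pvBuild_getD_eq _ _ _ hnp
  · simp [PySem.Dict.size_empty, PySem.Set.empty]
  · intro x
    simp [PySem.Dict.contains_eq_isSome_get?, PySem.Dict.get?_empty, PySem.Set.empty]
  · simp [PySem.Set.empty]

-- ===== VERDICT (by name: the statement is the Claim_ definition above) =====
theorem generate_combined_pattern_spec : Claim_equal_generate_combined_pattern := by
  intro w1 w2 w3 _
  unfold Spec_generate_combined_pattern
  unfold generate_combined_pattern generate_combined_pattern_alt pvBuildA
  rw [pvBuildA_eq _ _ _ (by simp [PySem.Dict.size_empty])]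
  simp only [pvFoldAppend_eq_map, List.nil_append]
  refine Prod.ext ?_ (Prod.ext ?_ ?_) <;>
  · apply List.map_congr_left
    intro c hc
    apply pvLookup_eq
    simp [hc]
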